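-- pv_equiv track=rewrite | github.com/alsgh9948/Problem-Solving | 프로그래머스/카드 짝 맞추기.py | renew_board
-- ===== SOURCE A (Python) =====
-- def renew_board(board):
--     pairs = [[] for _ in range(7)]
--
--     for x in range(4):
--         for y in range(4):
--             if board[x][y] > 0:
--                 pairs[board[x][y]].append((x, y))
--
--     new_num = 1
--     for pair in pairs:
--         for x, y in pair:
--             board[x][y] = new_num
--             new_num += 1
--     return board, new_num
-- ===== SOURCE B (Python) =====
-- def renew_board(board):
--     cells = sorted(
--         ((board[x][y], x, y) for x in range(4) for y in range(4) if board[x][y] > 0),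
--         key=lambda t: t[0],
--     )
--     for i, (_, x, y) in enumerate(cells):
--         board[x][y] = i + 1
--     return board, len(cells) + 1
-- ===== Notes on version B (the rewrite author's own statement) =====
-- stated objective: simpler
-- what changed: Replaces the size-7 bucket array (one scan filling buckets, then iterating all buckets) with a single collect-then-stable-sort-by-value-then-enumerate pipeline.
import Mathlib
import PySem

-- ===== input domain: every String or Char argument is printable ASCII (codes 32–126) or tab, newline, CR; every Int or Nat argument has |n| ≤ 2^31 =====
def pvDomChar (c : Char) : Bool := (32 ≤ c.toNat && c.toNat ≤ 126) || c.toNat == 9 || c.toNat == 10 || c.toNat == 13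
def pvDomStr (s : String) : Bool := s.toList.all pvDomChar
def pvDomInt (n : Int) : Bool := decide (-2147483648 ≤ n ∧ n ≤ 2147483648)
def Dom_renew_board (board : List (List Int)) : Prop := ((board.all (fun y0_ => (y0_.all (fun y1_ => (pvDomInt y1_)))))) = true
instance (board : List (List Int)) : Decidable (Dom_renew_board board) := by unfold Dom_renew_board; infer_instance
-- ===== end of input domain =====

-- B replaces A's size-7 bucket array with a collect → stable-sort-by-value → enumerate pipeline
-- (objective: simpler).  Both Pythons mutate `board` in place identically; the equivalence proved
-- here is about the return value.

-- board[x][y], totalised with a default; Pre_renew_board keeps every access in range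
def pvCell (board : List (List Int)) (x y : Int) : Int :=
  ((PySem.List.pyGet? ((PySem.List.pyGet? board x).getD []) y).getD 0)

-- board[x][y] = v  (both Pythons perform exactly this assignment)
def pvSetCell (b : List (List Int)) (x y v : Int) : List (List Int) :=
  b.modify x.toNat (fun row => row.set y.toNat v)

-- ===== PORT A =====
def renew_board (board : List (List Int)) : List (List Int) × Int :=
  let pairs :=
    (PySem.List.pyRange 0 4 1).foldl (fun pairs x =>
      (PySem.List.pyRange 0 4 1).foldl (fun pairs y =>
        if pvCell board x y > 0 then
          pairs.modify (pvCell board x y).toNat (fun p => p ++ [(x, y)])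
        else pairs) pairs)
      (List.replicate 7 ([] : List (Int × Int)))
  pairs.foldl (fun (st : List (List Int) × Int) pair =>
    pair.foldl (fun (st : List (List Int) × Int) xy =>
      (pvSetCell st.1 xy.1 xy.2 st.2, st.2 + 1)) st) (board, 1)

-- ===== PORT B =====
def renew_board_alt (board : List (List Int)) : List (List Int) × Int :=
  let cells := PySem.List.sorted
    ((PySem.List.pyRange 0 4 1).flatMap (fun x =>
      (PySem.List.pyRange 0 4 1).filterMap (fun y =>
        if pvCell board x y > 0 then some (pvCell board x y, x, y) else none)))
    (fun t => t.1) false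
  let b := (PySem.List.enumerate cells 0).foldl
    (fun b p => pvSetCell b p.2.2.1 p.2.2.2 (p.1 + 1)) board
  (b, (cells.length : Int) + 1)

-- ===== PRECONDITION & SPEC =====
-- Pre_ = exactly the inputs on which A returns: at least 4 rows, the first four rows have at
-- least 4 entries, and every cell of the 4x4 prefix is < 7 (a value ≥ 7 overruns A's bucket array).
def Pre_renew_board (board : List (List Int)) : Prop :=
  4 ≤ board.length ∧
  ∀ x ∈ PySem.List.pyRange 0 4 1,
    4 ≤ ((PySem.List.pyGet? board x).getD []).length ∧
    ∀ y ∈ PySem.List.pyRange 0 4 1, pvCell board x y < 7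
instance (board : List (List Int)) : Decidable (Pre_renew_board board) := by
  unfold Pre_renew_board; infer_instance

def pvWitness_renew_board : List (List Int) :=
  [[1, 0, 2, 0], [0, 2, 0, 1], [3, 0, 0, 3], [0, 6, 6, 0]]

def Spec_renew_board (board : List (List Int)) (out : List (List Int) × Int) : Prop :=
  out = renew_board_alt board
instance (board : List (List Int)) (out : List (List Int) × Int) :
    Decidable (Spec_renew_board board out) := by unfold Spec_renew_board; infer_instance

-- ===== CLAIM (what is proved, stated in full; the proofs are below) =====
def Claim_equal_renew_board : Prop :=
  ∀ (board : List (List Int)), Dom_renew_board board → Pre_renew_board board →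
    Spec_renew_board board (renew_board board)
-- ===== LEMMAS AND PROOFS =====

-- the row-major list of (value, x, y) over the nonzero cells of the 4x4 prefix
def pvCells (board : List (List Int)) : List (Int × Int × Int) :=
  (PySem.List.pyRange 0 4 1).flatMap (fun x =>
    (PySem.List.pyRange 0 4 1).filterMap (fun y =>
      if pvCell board x y > 0 then some (pvCell board x y, x, y) else none))

-- the bucket of value v, in scan order
def pvBk (v : Int) (cs : List (Int × Int × Int)) : List (Int × Int × Int) :=
  cs.filter (fun t => t.1 == v)

lemma pv_foldl_filterMap {α β γ : Type} (l : List α) (g : α → Option β) (f : γ → β → γ)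
    (init : γ) :
    (l.filterMap g).foldl f init
      = l.foldl (fun acc x => match g x with | some y => f acc y | none => acc) init := by
  induction l generalizing init with
  | nil => simp
  | cons a l ih =>
    simp only [List.filterMap_cons, List.foldl_cons]
    cases g a <;> simp [ih]


lemma pv_mem_pvBk {v : Int} {cs : List (Int × Int × Int)} {y : Int × Int × Int}
    (h : y ∈ pvBk v cs) : y.1 = v := by
  simp only [pvBk, List.mem_filter, beq_iff_eq] at h
  exact h.2


lemma pv_insertBy_append_not (before : Int × Int × Int → Int × Int × Int → Bool)
    (t : Int × Int × Int) (L1 L2 : List (Int × Int × Int))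
    (h : ∀ y ∈ L1, before t y = false) :
    PySem.List.insertBy before t (L1 ++ L2) = L1 ++ PySem.List.insertBy before t L2 := by
  induction L1 with
  | nil => simp
  | cons a L1 ih =>
    have ha := h a (by simp)
    simp [PySem.List.insertBy, ha, ih (fun y hy => h y (by simp [hy]))]


lemma pv_insertBy_all_before (before : Int × Int × Int → Int × Int × Int → Bool)
    (t : Int × Int × Int) (L : List (Int × Int × Int))
    (h : ∀ y ∈ L, before t y = true) :
    PySem.List.insertBy before t L = t :: L := by
  cases L with
  | nil => simp [PySem.List.insertBy]
  | cons a L => simp [PySem.List.insertBy, h a (by simp)]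


lemma pv_insert_flatMap (vs : List Int) (B : Int → List (Int × Int × Int))
    (t : Int × Int × Int) (hvs : vs.Pairwise (· < ·)) (ht : t.1 ∈ vs)
    (hB : ∀ v ∈ vs, ∀ y ∈ B v, y.1 = v) :
    PySem.List.insertBy (fun a b => decide (a.1 < b.1)) t (vs.flatMap B)
      = vs.flatMap (fun v => B v ++ if t.1 == v then [t] else []) := by
  induction vs with
  | nil => simp at ht
  | cons v rest ih =>
    rcases List.pairwise_cons.mp hvs with ⟨hlt, hrest⟩
    have hcongr : ∀ (L : List Int), (∀ v' ∈ L, t.1 ≠ v') →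
        L.flatMap (fun v' => B v' ++ if t.1 == v' then [t] else []) = L.flatMap B := by
      intro L
      induction L with
      | nil => simp
      | cons a L ihL =>
        intro hne
        have ha : (t.1 == a) = false := by simp [hne a (by simp)]
        rw [List.flatMap_cons, List.flatMap_cons, ihL (fun v' h' => hne v' (by simp [h'])), ha]
        simp
    by_cases hv : t.1 = v
    · have h1 : ∀ y ∈ B v, (fun a b => decide (a.1 < b.1)) t y = false := by
        intro y hy
        have := hB v (by simp) y hy
        simp [this, hv]
      rw [List.flatMap_cons, pv_insertBy_append_not _ _ _ _ h1]
      have h2 : ∀ y ∈ rest.flatMap B, (fun a b => decide (a.1 < b.1)) t y = true := by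
        intro y hy
        rcases List.mem_flatMap.mp hy with ⟨v', hv', hy'⟩
        have := hB v' (by simp [hv']) y hy'
        simp [this, hv]
        exact hlt v' hv'
      rw [pv_insertBy_all_before _ _ _ h2]
      have h3 : ∀ v' ∈ rest, t.1 ≠ v' := by
        intro v' h' heq
        have := hlt v' h'
        omega
      rw [List.flatMap_cons, hcongr rest h3]
      simp [hv]
    · have ht' : t.1 ∈ rest := by
        rcases List.mem_cons.mp ht with h | h
        · exact absurd h hv
        · exact h
      have h1 : ∀ y ∈ B v, (fun a b => decide (a.1 < b.1)) t y = false := by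
        intro y hy
        have hy1 := hB v (by simp) y hy
        have : v < t.1 := hlt _ ht'
        simp [hy1]
        omega
      rw [List.flatMap_cons, pv_insertBy_append_not _ _ _ _ h1,
        ih hrest ht' (fun v' h' y hy => hB v' (by simp [h']) y hy)]
      have hfa : (t.1 == v) = false := by simp [hv]
      rw [List.flatMap_cons, hfa]
      simp

lemma pv_sorted_char (cs : List (Int × Int × Int))
    (h : ∀ t ∈ cs, 0 < t.1 ∧ t.1 < 7) :
    PySem.List.sorted cs (fun t => t.1) false
      = ([1, 2, 3, 4, 5, 6] : List Int).flatMap (fun v => pvBk v cs) := by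
  induction cs using List.reverseRecOn with
  | nil => simp [PySem.List.sorted_eq_foldl_insertBy, pvBk]
  | append_singleton l t ih =>
    have hl : ∀ s ∈ l, 0 < s.1 ∧ s.1 < 7 := fun s hs => h s (by simp [hs])
    have ht := h t (by simp)
    rw [PySem.List.sorted_eq_foldl_insertBy, List.foldl_append, List.foldl_cons, List.foldl_nil,
      ← PySem.List.sorted_eq_foldl_insertBy, ih hl]
    rw [pv_insert_flatMap _ _ _ (by decide)
      (by simp only [List.mem_cons, List.not_mem_nil, or_false]; omega)
      (fun v hv y hy => pv_mem_pvBk hy)]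
    have hbk : ∀ v : Int, pvBk v (l ++ [t]) = pvBk v l ++ (if t.1 == v then [t] else []) := by
      intro v
      simp only [pvBk, List.filter_append, List.filter_cons, List.filter_nil]
    simp [hbk]

lemma pv_buckets_char (cs : List (Int × Int × Int))
    (h : ∀ t ∈ cs, 0 < t.1 ∧ t.1 < 7) :
    cs.foldl (fun pairs t => pairs.modify t.1.toNat (fun p => p ++ [t.2]))
        (List.replicate 7 ([] : List (Int × Int)))
      = [[], (pvBk 1 cs).map (·.2), (pvBk 2 cs).map (·.2), (pvBk 3 cs).map (·.2),
          (pvBk 4 cs).map (·.2), (pvBk 5 cs).map (·.2), (pvBk 6 cs).map (·.2)] := by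
  induction cs using List.reverseRecOn with
  | nil => rfl
  | append_singleton l t ih =>
    have hl : ∀ s ∈ l, 0 < s.1 ∧ s.1 < 7 := fun s hs => h s (by simp [hs])
    obtain ⟨h1, h2⟩ := h t (by simp)
    rw [List.foldl_append, List.foldl_cons, List.foldl_nil, ih hl]
    have hbk : ∀ v : Int, pvBk v (l ++ [t]) = pvBk v l ++ (if t.1 == v then [t] else []) := by
      intro v
      simp only [pvBk, List.filter_append, List.filter_cons, List.filter_nil]
    have hc : t.1 = 1 ∨ t.1 = 2 ∨ t.1 = 3 ∨ t.1 = 4 ∨ t.1 = 5 ∨ t.1 = 6 := by omega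
    rcases hc with hc | hc | hc | hc | hc | hc <;>
      simp [hbk, hc, List.modify_succ_cons, List.modify_zero_cons]

lemma pv_A_buckets (board : List (List Int)) (init : List (List (Int × Int))) :
    (PySem.List.pyRange 0 4 1).foldl (fun pairs x =>
      (PySem.List.pyRange 0 4 1).foldl (fun pairs y =>
        if pvCell board x y > 0 then
          pairs.modify (pvCell board x y).toNat (fun p => p ++ [(x, y)])
        else pairs) pairs) init
      = (pvCells board).foldl (fun pairs t => pairs.modify t.1.toNat (fun p => p ++ [t.2]))
          init := by
  unfold pvCells
  rw [List.foldl_flatMap]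
  apply PySem.List.foldl_congr_mem
  intro acc x hx
  rw [pv_foldl_filterMap]
  apply PySem.List.foldl_congr_mem
  intro acc2 y hy
  by_cases c : pvCell board x y > 0 <;> simp [c]

lemma pv_cells_values (board : List (List Int)) (hPre : Pre_renew_board board) :
    ∀ t ∈ pvCells board, 0 < t.1 ∧ t.1 < 7 := by
  intro t ht
  unfold pvCells at ht
  simp only [List.mem_flatMap, List.mem_filterMap] at ht
  obtain ⟨x, hx, y, hy, hsome⟩ := ht
  by_cases c : pvCell board x y > 0
  · rw [if_pos c] at hsome
    have h7 := (hPre.2 x hx).2 y hy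
    cases hsome
    exact ⟨c, h7⟩
  · simp [c] at hsome

lemma pv_phase2 (l : List (Int × Int × Int)) :
    ∀ (b : List (List Int)) (k : Int),
    (l.map (fun t => t.2)).foldl
        (fun (st : List (List Int) × Int) xy => (pvSetCell st.1 xy.1 xy.2 st.2, st.2 + 1)) (b, k)
      = ((PySem.List.enumerate l k).foldl (fun bb p => pvSetCell bb p.2.2.1 p.2.2.2 p.1) b,
          k + l.length) := by
  induction l with
  | nil => simp
  | cons t rest ih =>
    intro b k
    simp only [List.map_cons, List.foldl_cons, PySem.List.enumerate_cons]
    rw [ih]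
    refine Prod.ext rfl ?_
    simp only [List.length_cons]
    push_cast
    ring

lemma pv_enum_shift (l : List (Int × Int × Int)) :
    ∀ (k : Int) (b : List (List Int)),
    (PySem.List.enumerate l (k + 1)).foldl (fun bb p => pvSetCell bb p.2.2.1 p.2.2.2 p.1) b
      = (PySem.List.enumerate l k).foldl
          (fun bb p => pvSetCell bb p.2.2.1 p.2.2.2 (p.1 + 1)) b := by
  induction l with
  | nil => intro k b; simp [PySem.List.enumerate_nil]
  | cons t rest ih =>
    intro k b
    simp only [PySem.List.enumerate_cons, List.foldl_cons]
    rw [show k + 1 + 1 = (k + 1) + 1 by ring, ih (k + 1)]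

-- ===== VERDICT (by name: the statement is the Claim_ definition above) =====
theorem renew_board_spec : Claim_equal_renew_board := by
  intro board _ hpre
  have hv := pv_cells_values board hpre
  unfold Spec_renew_board
  have hdef : renew_board_alt board =
      ((PySem.List.enumerate (PySem.List.sorted (pvCells board) (fun t => t.1)) 0).foldl
          (fun b p => pvSetCell b p.2.2.1 p.2.2.2 (p.1 + 1)) board,
        ((PySem.List.sorted (pvCells board) (fun t => t.1)).length : Int) + 1) := rfl
  rw [hdef]
  simp only [renew_board]
  rw [pv_A_buckets, pv_buckets_char _ hv, ← List.foldl_flatten]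
  simp only [List.flatten_cons, List.flatten_nil, List.nil_append, List.append_nil]
  have hflat :
      ((([1, 2, 3, 4, 5, 6] : List Int).flatMap (fun v => pvBk v (pvCells board))).map
          (fun t => t.2))
        = (pvBk 1 (pvCells board)).map (fun t => t.2) ++ ((pvBk 2 (pvCells board)).map (fun t => t.2)
          ++ ((pvBk 3 (pvCells board)).map (fun t => t.2) ++ ((pvBk 4 (pvCells board)).map (fun t => t.2)
          ++ ((pvBk 5 (pvCells board)).map (fun t => t.2) ++ (pvBk 6 (pvCells board)).map (fun t => t.2))))) := by
    simp
  rw [← hflat, ← pv_sorted_char _ hv, pv_phase2]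
  rw [← pv_enum_shift _ 0 board]
  norm_num [add_comm]
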